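-- pv_equiv track=rewrite | github.com/murilopetegrossoperes/Python_exercices | Vetores/EP5_3.py | intercalar
-- ===== SOURCE A (Python) =====
-- def intercalar(v1, v2):
--     v3 = [0] * 10
--     for i in range(10):
--         if i % 2 == 0:
--             v3[i] = v1[i//2]
--         else:
--             v3[i] = v2[i//2]
--     # Sua lógica aqui
--     return v3
-- ===== SOURCE B (Python) =====
-- def intercalar(v1, v2):
--     return [val for i in range(5) for val in (v1[i], v2[i])]
-- ===== Notes on version B (the rewrite author's own statement) =====
-- stated objective: simpler
-- what changed: Replaces the preallocated length-10 list with parity-branched index arithmetic (i%2, i//2) by a single comprehension over the five positions that emits v1[i] and v2[i] directly.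
import Mathlib
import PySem

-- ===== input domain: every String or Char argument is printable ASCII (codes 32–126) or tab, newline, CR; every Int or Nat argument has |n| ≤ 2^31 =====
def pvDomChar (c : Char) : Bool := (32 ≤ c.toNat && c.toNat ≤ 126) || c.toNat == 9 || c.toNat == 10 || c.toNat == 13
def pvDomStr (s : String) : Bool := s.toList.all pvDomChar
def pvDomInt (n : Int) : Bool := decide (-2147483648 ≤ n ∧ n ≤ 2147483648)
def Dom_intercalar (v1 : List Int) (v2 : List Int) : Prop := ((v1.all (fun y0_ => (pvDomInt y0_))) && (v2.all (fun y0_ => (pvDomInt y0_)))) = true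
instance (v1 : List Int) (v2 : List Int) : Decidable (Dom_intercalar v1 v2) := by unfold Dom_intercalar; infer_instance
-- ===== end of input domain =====

-- B replaces the parity-branched length-10 loop with a comprehension pairing v1[i], v2[i] per position (simpler).


-- ===== PORT A =====
def intercalar (v1 : List Int) (v2 : List Int) : List Int :=
  (PySem.List.pyRange 0 10 1).foldl
    (fun v3 i =>
      if PySem.Int.mod i 2 = 0 then
        PySem.List.pySetD v3 i (PySem.List.pyGetD v1 (PySem.Int.floordiv i 2) 0)
      else
        PySem.List.pySetD v3 i (PySem.List.pyGetD v2 (PySem.Int.floordiv i 2) 0))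
    (List.replicate 10 0)

-- ===== PORT B =====
def intercalar_alt (v1 : List Int) (v2 : List Int) : List Int :=
  (PySem.List.pyRange 0 5 1).flatMap
    (fun i => [PySem.List.pyGetD v1 i 0, PySem.List.pyGetD v2 i 0])

-- ===== PRECONDITION & SPEC =====
-- A (and B) raise IndexError when either vector has fewer than 5 elements.
def Pre_intercalar (v1 : List Int) (v2 : List Int) : Prop :=
  5 ≤ v1.length ∧ 5 ≤ v2.length
instance (v1 : List Int) (v2 : List Int) : Decidable (Pre_intercalar v1 v2) := by
  unfold Pre_intercalar; infer_instance

def pvWitness_intercalar : List Int × List Int :=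
  ([1, 2, 3, 4, 5], [6, 7, 8, 9, 10])

def Spec_intercalar (v1 : List Int) (v2 : List Int) (out : List Int) : Prop := out = intercalar_alt v1 v2
instance (v1 : List Int) (v2 : List Int) (out : List Int) : Decidable (Spec_intercalar v1 v2 out) := by unfold Spec_intercalar; infer_instance

-- ===== CLAIM =====
def Claim_equal_intercalar : Prop :=
  ∀ (v1 : List Int) (v2 : List Int), Dom_intercalar v1 v2 → Pre_intercalar v1 v2 →
    Spec_intercalar v1 v2 (intercalar v1 v2)

-- ===== LEMMAS AND PROOFS =====

-- ===== VERDICT =====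
theorem intercalar_spec : Claim_equal_intercalar := by
  intro v1 v2 _ hpre
  obtain ⟨h1, h2⟩ := hpre
  obtain ⟨a0, a1, a2, a3, a4, t1, rfl⟩ :
      ∃ a0 a1 a2 a3 a4 t, v1 = a0 :: a1 :: a2 :: a3 :: a4 :: t := by
    rcases v1 with _ | ⟨a0, _ | ⟨a1, _ | ⟨a2, _ | ⟨a3, _ | ⟨a4, t⟩⟩⟩⟩⟩ <;>
      first
        | exact ⟨_, _, _, _, _, _, rfl⟩
        | (exfalso; simp at h1)
  obtain ⟨b0, b1, b2, b3, b4, t2, rfl⟩ :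
      ∃ b0 b1 b2 b3 b4 t, v2 = b0 :: b1 :: b2 :: b3 :: b4 :: t := by
    rcases v2 with _ | ⟨b0, _ | ⟨b1, _ | ⟨b2, _ | ⟨b3, _ | ⟨b4, t⟩⟩⟩⟩⟩ <;>
      first
        | exact ⟨_, _, _, _, _, _, rfl⟩
        | (exfalso; simp at h2)
  · have hr10 : PySem.List.pyRange 0 10 1 =
        [((0:Nat):Int),((1:Nat):Int),((2:Nat):Int),((3:Nat):Int),((4:Nat):Int),
         ((5:Nat):Int),((6:Nat):Int),((7:Nat):Int),((8:Nat):Int),((9:Nat):Int)] := by decide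
    have hr5 : PySem.List.pyRange 0 5 1 =
        [((0:Nat):Int),((1:Nat):Int),((2:Nat):Int),((3:Nat):Int),((4:Nat):Int)] := by decide
    have hm0 : PySem.Int.mod ((0:Nat):Int) 2 = (0:Int) := by decide
    have hm1 : PySem.Int.mod ((1:Nat):Int) 2 = (1:Int) := by decide
    have hm2 : PySem.Int.mod ((2:Nat):Int) 2 = (0:Int) := by decide
    have hm3 : PySem.Int.mod ((3:Nat):Int) 2 = (1:Int) := by decide
    have hm4 : PySem.Int.mod ((4:Nat):Int) 2 = (0:Int) := by decide
    have hm5 : PySem.Int.mod ((5:Nat):Int) 2 = (1:Int) := by decide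
    have hm6 : PySem.Int.mod ((6:Nat):Int) 2 = (0:Int) := by decide
    have hm7 : PySem.Int.mod ((7:Nat):Int) 2 = (1:Int) := by decide
    have hm8 : PySem.Int.mod ((8:Nat):Int) 2 = (0:Int) := by decide
    have hm9 : PySem.Int.mod ((9:Nat):Int) 2 = (1:Int) := by decide
    have hd0 : PySem.Int.floordiv ((0:Nat):Int) 2 = ((0:Nat):Int) := by decide
    have hd1 : PySem.Int.floordiv ((1:Nat):Int) 2 = ((0:Nat):Int) := by decide
    have hd2 : PySem.Int.floordiv ((2:Nat):Int) 2 = ((1:Nat):Int) := by decide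
    have hd3 : PySem.Int.floordiv ((3:Nat):Int) 2 = ((1:Nat):Int) := by decide
    have hd4 : PySem.Int.floordiv ((4:Nat):Int) 2 = ((2:Nat):Int) := by decide
    have hd5 : PySem.Int.floordiv ((5:Nat):Int) 2 = ((2:Nat):Int) := by decide
    have hd6 : PySem.Int.floordiv ((6:Nat):Int) 2 = ((3:Nat):Int) := by decide
    have hd7 : PySem.Int.floordiv ((7:Nat):Int) 2 = ((3:Nat):Int) := by decide
    have hd8 : PySem.Int.floordiv ((8:Nat):Int) 2 = ((4:Nat):Int) := by decide
    have hd9 : PySem.Int.floordiv ((9:Nat):Int) 2 = ((4:Nat):Int) := by decide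
    show intercalar _ _ = intercalar_alt _ _
    rw [intercalar, intercalar_alt, hr10, hr5]
    simp only [List.foldl, List.flatMap_cons, List.flatMap_nil,
      hm0, hm1, hm2, hm3, hm4, hm5, hm6, hm7, hm8, hm9,
      hd0, hd1, hd2, hd3, hd4, hd5, hd6, hd7, hd8, hd9,
      PySem.List.pyGetD_natCast, PySem.List.pySetD_natCast]
    norm_num [List.set, List.getD, List.replicate]
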